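-- pv_equiv track=rewrite | github.com/agheieff/Collatz | cycles/binary_dev/j_pattern_analysis.py | j_pattern_element_bounds
-- ===== SOURCE A (Python) =====
-- from typing import List, Set, Tuple
--
-- def j_pattern_element_bounds(j_pattern: List[int], n1: int) -> Tuple[int, int]:
--     """Given a j-pattern and starting element, compute min/max elements."""
--     elements = [n1]
--     current = n1
--
--     for j in j_pattern:
--         if j == 1:
--             current = (3 * current + 1) // 2
--         else:  # j == 2
--             current = (3 * current + 1) // 4
--         elements.append(current)
--
--     return min(elements), max(elements)
-- ===== SOURCE B (Python) =====
-- def j_pattern_element_bounds(j_pattern, n1):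
--     """Divide-and-conquer: bounds of a segment's chain are merged from its two halves."""
--     def go(seg, n):
--         # (lo, hi, end) of the chain starting at n (inclusive) driven by seg
--         if not seg:
--             return n, n, n
--         if len(seg) == 1:
--             m = (3 * n + 1) // (2 if seg[0] == 1 else 4)
--             return min(n, m), max(n, m), m
--         h = len(seg) // 2
--         lo1, hi1, mid = go(seg[:h], n)
--         lo2, hi2, end = go(seg[h:], mid)
--         return min(lo1, lo2), max(hi1, hi2), end
--     lo, hi, _ = go(j_pattern, n1)
--     return lo, hi
-- ===== Notes on version B (the rewrite author's own statement) =====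
-- stated objective: alternative
-- what changed: B computes the bounds by divide-and-conquer: it recursively splits the j-pattern in half, computes (min, max, end-value) of each half's chain segment, and merges them, instead of A's linear loop that materialises the whole element list and scans it with min() and max().
import Mathlib
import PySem

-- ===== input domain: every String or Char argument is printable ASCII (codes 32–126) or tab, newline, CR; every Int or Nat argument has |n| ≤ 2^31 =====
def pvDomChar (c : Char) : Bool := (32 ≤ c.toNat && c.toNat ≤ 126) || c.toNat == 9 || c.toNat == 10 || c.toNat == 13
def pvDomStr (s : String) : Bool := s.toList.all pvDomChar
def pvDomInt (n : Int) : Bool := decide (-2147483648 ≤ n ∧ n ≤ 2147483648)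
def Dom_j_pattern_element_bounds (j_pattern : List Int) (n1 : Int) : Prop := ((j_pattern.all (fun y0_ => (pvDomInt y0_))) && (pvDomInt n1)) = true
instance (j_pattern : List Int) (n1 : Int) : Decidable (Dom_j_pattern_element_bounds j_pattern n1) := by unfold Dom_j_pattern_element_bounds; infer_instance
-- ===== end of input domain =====

-- B replaces A's build-list-then-min/max loop by a divide-and-conquer over the pattern
-- (segment bounds merged from halves); objective: alternative algorithm, same results.

-- ===== PORT A =====
-- the for-loop of A: accumulates the growing `elements` list
def jpebA_loop (js : List Int) (current : Int) (elements : List Int) : List Int :=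
  match js with
  | [] => elements
  | j :: rest =>
    let c := if j = 1 then PySem.Int.floordiv (3 * current + 1) 2
             else PySem.Int.floordiv (3 * current + 1) 4
    jpebA_loop rest c (elements ++ [c])

def j_pattern_element_bounds (j_pattern : List Int) (n1 : Int) : Int × Int :=
  let elements := jpebA_loop j_pattern n1 [n1]
  ((PySem.List.min? elements (fun x => x)).getD 0,
   (PySem.List.max? elements (fun x => x)).getD 0)

-- ===== PORT B =====
-- inner `go(seg, n)` of Source B: (lo, hi, end-value) of the chain segment driven by seg
def jpebB_go (seg : List Int) (n : Int) : Int × Int × Int :=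
  match seg with
  | [] => (n, n, n)
  | [j] =>
    let m := PySem.Int.floordiv (3 * n + 1) (if j = 1 then 2 else 4)
    (min n m, max n m, m)
  | j1 :: j2 :: rest =>
    let s := j1 :: j2 :: rest
    let h := s.length / 2
    let r1 := jpebB_go (s.take h) n
    let r2 := jpebB_go (s.drop h) r1.2.2
    (min r1.1 r2.1, max r1.2.1 r2.2.1, r2.2.2)
termination_by seg.length
decreasing_by
  all_goals simp [List.length_take, List.length_drop, List.length_cons]
  all_goals omega

def j_pattern_element_bounds_alt (j_pattern : List Int) (n1 : Int) : Int × Int :=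
  let r := jpebB_go j_pattern n1
  (r.1, r.2.1)

-- ===== PRECONDITION & SPEC =====
def Spec_j_pattern_element_bounds (j_pattern : List Int) (n1 : Int) (out : Int × Int) : Prop := out = j_pattern_element_bounds_alt j_pattern n1
instance (j_pattern : List Int) (n1 : Int) (out : Int × Int) : Decidable (Spec_j_pattern_element_bounds j_pattern n1 out) := by unfold Spec_j_pattern_element_bounds; infer_instance

-- ===== CLAIM (what is proved, stated in full; the proofs are below) =====
def Claim_equal_j_pattern_element_bounds : Prop := ∀ (j_pattern : List Int) (n1 : Int), Dom_j_pattern_element_bounds j_pattern n1 → Spec_j_pattern_element_bounds j_pattern n1 (j_pattern_element_bounds j_pattern n1)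

-- ===== LEMMAS AND PROOFS =====

-- one recurrence step
def jpebStep (j n : Int) : Int :=
  if j = 1 then PySem.Int.floordiv (3 * n + 1) 2
  else PySem.Int.floordiv (3 * n + 1) 4

-- the stream of successive elements produced by the recurrence (n excluded)
def jpebProduced (js : List Int) (n : Int) : List Int :=
  match js with
  | [] => []
  | j :: rest => jpebStep j n :: jpebProduced rest (jpebStep j n)

-- the last element of the chain
def jpebFinal (js : List Int) (n : Int) : Int :=
  match js with
  | [] => n
  | j :: rest => jpebFinal rest (jpebStep j n)

theorem jpebA_loop_eq (js : List Int) (current : Int) (elements : List Int) :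
    jpebA_loop js current elements = elements ++ jpebProduced js current := by
  induction js generalizing current elements with
  | nil => simp [jpebA_loop, jpebProduced]
  | cons j rest ih => simp [jpebA_loop, jpebProduced, jpebStep, ih]

theorem jpebProduced_append (s t : List Int) (n : Int) :
    jpebProduced (s ++ t) n = jpebProduced s n ++ jpebProduced t (jpebFinal s n) := by
  induction s generalizing n with
  | nil => simp [jpebProduced, jpebFinal]
  | cons j rest ih => simp [jpebProduced, jpebFinal, ih]

theorem jpebFinal_append (s t : List Int) (n : Int) :
    jpebFinal (s ++ t) n = jpebFinal t (jpebFinal s n) := by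
  induction s generalizing n with
  | nil => simp [jpebFinal]
  | cons j rest ih => simp [jpebFinal, ih]

theorem foldl_min_min (l : List Int) (a b : Int) :
    l.foldl min (min a b) = min a (l.foldl min b) := by
  induction l generalizing b with
  | nil => simp
  | cons x t ih => simp only [List.foldl_cons, min_assoc, ih]

theorem foldl_max_max (l : List Int) (a b : Int) :
    l.foldl max (max a b) = max a (l.foldl max b) := by
  induction l generalizing b with
  | nil => simp
  | cons x t ih => simp only [List.foldl_cons, max_assoc, ih]

theorem foldl_min_le_final (s : List Int) (n : Int) :
    (jpebProduced s n).foldl min n ≤ jpebFinal s n := by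
  induction s generalizing n with
  | nil => simp [jpebProduced, jpebFinal]
  | cons j rest ih =>
    simp only [jpebProduced, jpebFinal, List.foldl_cons]
    calc (jpebProduced rest (jpebStep j n)).foldl min (min n (jpebStep j n))
        = min n ((jpebProduced rest (jpebStep j n)).foldl min (jpebStep j n)) :=
          foldl_min_min _ _ _
      _ ≤ _ := le_trans (min_le_right _ _) (ih _)

theorem final_le_foldl_max (s : List Int) (n : Int) :
    jpebFinal s n ≤ (jpebProduced s n).foldl max n := by
  induction s generalizing n with
  | nil => simp [jpebProduced, jpebFinal]
  | cons j rest ih =>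
    simp only [jpebProduced, jpebFinal, List.foldl_cons]
    calc jpebFinal rest (jpebStep j n)
        ≤ (jpebProduced rest (jpebStep j n)).foldl max (jpebStep j n) := ih _
      _ ≤ max n ((jpebProduced rest (jpebStep j n)).foldl max (jpebStep j n)) :=
          le_max_right _ _
      _ = (jpebProduced rest (jpebStep j n)).foldl max (max n (jpebStep j n)) :=
          (foldl_max_max _ _ _).symm

theorem jpebB_go_eq_aux (m : Nat) : ∀ (seg : List Int) (n : Int), seg.length ≤ m →
    jpebB_go seg n = ((jpebProduced seg n).foldl min n,
                      (jpebProduced seg n).foldl max n,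
                      jpebFinal seg n) := by
  induction m with
  | zero =>
    intro seg n h
    match seg with
    | [] => simp [jpebB_go, jpebProduced, jpebFinal]
  | succ m ih =>
    intro seg n h
    match seg with
    | [] => simp [jpebB_go, jpebProduced, jpebFinal]
    | [j] =>
      simp only [jpebB_go, jpebProduced, jpebFinal, List.foldl_cons, List.foldl_nil]
      by_cases hj : j = 1 <;> simp [jpebStep, hj]
    | j1 :: j2 :: rest =>
      have hlen : (j1 :: j2 :: rest).length = rest.length + 2 := by simp
      have h1 := ih ((j1 :: j2 :: rest).take ((j1 :: j2 :: rest).length / 2)) n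
        (by simp only [List.length_take]; omega)
      have h2 := ih ((j1 :: j2 :: rest).drop ((j1 :: j2 :: rest).length / 2))
        (jpebFinal ((j1 :: j2 :: rest).take ((j1 :: j2 :: rest).length / 2)) n)
        (by simp only [List.length_drop]; omega)
      rw [jpebB_go]
      simp only [h1, h2]
      have hsplit : (j1 :: j2 :: rest).take ((j1 :: j2 :: rest).length / 2)
          ++ (j1 :: j2 :: rest).drop ((j1 :: j2 :: rest).length / 2) = j1 :: j2 :: rest :=
        List.take_append_drop _ _
      set L := (j1 :: j2 :: rest).take ((j1 :: j2 :: rest).length / 2) with hL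
      set R := (j1 :: j2 :: rest).drop ((j1 :: j2 :: rest).length / 2) with hR
      rw [← hsplit, jpebProduced_append, jpebFinal_append, List.foldl_append, List.foldl_append]
      refine Prod.ext ?_ (Prod.ext ?_ rfl)
      · show min ((jpebProduced L n).foldl min n)
              ((jpebProduced R (jpebFinal L n)).foldl min (jpebFinal L n))
            = (jpebProduced R (jpebFinal L n)).foldl min ((jpebProduced L n).foldl min n)
        rw [← foldl_min_min]
        congr 1
        exact min_eq_left (foldl_min_le_final _ _)
      · show max ((jpebProduced L n).foldl max n)
              ((jpebProduced R (jpebFinal L n)).foldl max (jpebFinal L n))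
            = (jpebProduced R (jpebFinal L n)).foldl max ((jpebProduced L n).foldl max n)
        rw [← foldl_max_max]
        congr 1
        exact max_eq_left (final_le_foldl_max _ _)

theorem jpebB_go_eq (seg : List Int) (n : Int) :
    jpebB_go seg n = ((jpebProduced seg n).foldl min n,
                      (jpebProduced seg n).foldl max n,
                      jpebFinal seg n) :=
  jpebB_go_eq_aux seg.length seg n le_rfl

-- ===== VERDICT (by name: the statement is the Claim_ definition above) =====
theorem j_pattern_element_bounds_spec : Claim_equal_j_pattern_element_bounds := by
  intro js n1 _
  unfold Spec_j_pattern_element_bounds j_pattern_element_bounds j_pattern_element_bounds_alt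
  rw [jpebA_loop_eq, jpebB_go_eq]
  simp [PySem.List.min?_id_cons, PySem.List.max?_id_cons]
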